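-- pv_equiv track=rewrite | github.com/jack0712li/Leetcode | amazon/oa1.py | longest_matching_substring
-- ===== SOURCE A (Python) =====
-- def longest_matching_substring(text, regex):
--
--     prefix, _, suffix = regex.partition('*')
--
--     max_length = 0
--     longest_substring = ""
--
--
--     for i in range(len(text)):
--         # If the current segment starts with the prefix
--         if text[i:].startswith(prefix):
--             # Search for the suffix starting from the end of the prefix
--             for j in range(i + len(prefix), len(text) - len(suffix) + 1):
--                 # If a matching suffix is found
--                 if text[j:].startswith(suffix):
--                     # Calculate the length of the current substring
--                     current_length = j + len(suffix) - i
--                     # Update the longest substring if the current one is longer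
--                     if current_length > max_length:
--                         max_length = current_length
--                         longest_substring = text[i:j + len(suffix)]
--
--     return longest_substring
-- ===== SOURCE B (Python) =====
-- def longest_matching_substring(text, regex):
--     prefix, _, suffix = regex.partition('*')
--     # smallest prefix-start; the longest candidate always begins there
--     i = text.find(prefix)
--     if i == -1:
--         return ""
--     # farthest suffix-start anywhere in the text
--     j = text.rfind(suffix)
--     if j < i + len(prefix):
--         return ""
--     return text[i:j + len(suffix)]
-- ===== Notes on version B (the rewrite author's own statement) =====
-- stated objective: faster
-- what changed: A scans every prefix-start i and, for each, every later suffix-start j (nested loops); B computes the single answer directly from text.find(prefix) (first prefix occurrence) and text.rfind(suffix) (last suffix occurrence), with no loops of its own.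
import Mathlib
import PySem

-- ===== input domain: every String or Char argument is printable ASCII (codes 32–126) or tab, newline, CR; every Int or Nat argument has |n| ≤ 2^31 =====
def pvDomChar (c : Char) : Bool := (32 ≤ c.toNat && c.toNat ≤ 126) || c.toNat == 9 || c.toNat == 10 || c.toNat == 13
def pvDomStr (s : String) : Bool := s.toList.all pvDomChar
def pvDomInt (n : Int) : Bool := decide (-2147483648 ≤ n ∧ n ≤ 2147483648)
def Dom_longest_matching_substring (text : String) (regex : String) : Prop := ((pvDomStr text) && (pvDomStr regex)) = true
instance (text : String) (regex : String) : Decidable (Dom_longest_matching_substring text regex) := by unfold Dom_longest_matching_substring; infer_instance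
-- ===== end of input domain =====

-- B replaces A's quadratic scan over all prefix/suffix start pairs by one find (first prefix
-- occurrence) and one rfind (last suffix occurrence); equivalence of the return values is proved.

-- ===== PORT A =====
-- regex.partition('*') : the pair (part before the first '*', part after it);
-- if '*' is absent Python returns ('', ...) tail empty — i.e. (regex, "").
def pvPartStar (r : List Char) : List Char × List Char :=
  let k := PySem.Chars.find r ['*']
  if k = -1 then (r, []) else (r.take k.toNat, r.drop (k.toNat + 1))

-- the inner-loop body: one step over j (text[j:].startswith(suffix), the length test, the update)
def pvStep (t S : List Char) (i : Nat) (st : Nat × List Char) (j : Nat) : Nat × List Char :=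
  if PySem.Chars.startswith (t.drop j) S then
    if st.1 < j + S.length - i then
      (j + S.length - i, (t.drop i).take (j + S.length - i))
    else st
  else st

-- one outer-loop iteration: range(i+len(prefix), len(text)-len(suffix)+1) is the Nat range
-- List.range' (i+p) ((n+1) - s - (i+p)) — truncated subtraction = Python's empty-range clamp
def pvRow (t P S : List Char) (n : Nat) (st : Nat × List Char) (i : Nat) : Nat × List Char :=
  if PySem.Chars.startswith (t.drop i) P then
    (List.range' (i + P.length) ((n + 1) - S.length - (i + P.length))).foldl (pvStep t S i) st
  else st

def longest_matching_substring (text : String) (regex : String) : String :=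
  let t := text.toList
  let pr := pvPartStar regex.toList
  String.mk ((List.range t.length).foldl (pvRow t pr.1 pr.2 t.length) (0, [])).2

-- ===== PORT B =====
def longest_matching_substring_alt (text : String) (regex : String) : String :=
  let t := text.toList
  let pr := pvPartStar regex.toList
  let i := PySem.Chars.find t pr.1
  if i = -1 then ""
  else
    let j := PySem.Chars.rfind t pr.2
    if j < i + pr.1.length then ""
    else String.mk (PySem.Chars.slice t (some i) (some (j + pr.2.length)))

-- ===== PRECONDITION & SPEC =====
def Spec_longest_matching_substring (text : String) (regex : String) (out : String) : Prop := out = longest_matching_substring_alt text regex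
instance (text : String) (regex : String) (out : String) : Decidable (Spec_longest_matching_substring text regex out) := by unfold Spec_longest_matching_substring; infer_instance

-- ===== CLAIM (what is proved, stated in full; the proofs are below) =====
def Claim_equal_longest_matching_substring : Prop := ∀ (text : String) (regex : String), Dom_longest_matching_substring text regex → Spec_longest_matching_substring text regex (longest_matching_substring text regex)

-- ===== LEMMAS AND PROOFS =====

-- greatest j < m with (t.drop j).startswith S, as an Option
def pvG (t S : List Char) : Nat → Option Nat
  | 0 => none
  | m + 1 => if S.isPrefixOf (t.drop m) then some m else pvG t S m

theorem pvG_some (t S : List Char) (m J : Nat) (h : pvG t S m = some J) :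
    J < m ∧ S.isPrefixOf (t.drop J) = true ∧
      ∀ k, J < k → k < m → S.isPrefixOf (t.drop k) = false := by
  induction m with
  | zero => simp [pvG] at h
  | succ m ih =>
    by_cases hm : S.isPrefixOf (t.drop m) = true
    · simp [pvG, hm] at h
      subst h
      exact ⟨Nat.lt_succ_self m, hm, fun k hk1 hk2 => by omega⟩
    · simp [pvG, hm] at h
      obtain ⟨h1, h2, h3⟩ := ih h
      refine ⟨by omega, h2, fun k hk1 hk2 => ?_⟩
      rcases Nat.lt_or_ge k m with hk | hk
      · exact h3 k hk1 hk
      · have : k = m := by omega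
        subst this
        simp only [Bool.not_eq_true] at hm
        exact hm

theorem pvG_succ (t S : List Char) (m : Nat) :
    pvG t S (m + 1) = if S.isPrefixOf (t.drop m) then some m else pvG t S m := rfl

theorem pvRfindGoEq (t S : List Char) (f : Nat) :
    PySem.Chars.rfind.go t S f =
      (match pvG t S (f + 1) with | some J => (J : Int) | none => -1) := by
  induction f with
  | zero =>
    rw [PySem.Chars.rfind.go, pvG_succ]
    by_cases h : S.isPrefixOf (t.drop 0) = true
    · simp only [List.drop_zero] at h; simp [h]
    · simp only [List.drop_zero, Bool.not_eq_true] at h; simp [h, pvG]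
  | succ f ih =>
    rw [PySem.Chars.rfind.go, pvG_succ]
    by_cases h : S.isPrefixOf (t.drop (f + 1)) = true
    · simp [h]
    · simp only [Bool.not_eq_true] at h; simp [h, ih]

-- a suffix match sits below stop = (n+1) - s (s ≥ 1)
theorem pvSufLtStop (t S : List Char) (j : Nat) (hS : S ≠ [])
    (h : S.isPrefixOf (t.drop j) = true) : j < (t.length + 1) - S.length := by
  have hp : S <+: t.drop j := List.isPrefixOf_iff_prefix.mp h
  have hl : S.length ≤ (t.drop j).length := hp.length_le
  rw [List.length_drop] at hl
  have : 1 ≤ S.length := List.length_pos_iff.mpr hS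
  omega

theorem pvG_stable (t S : List Char) (hS : S ≠ []) (m : Nat)
    (hm : (t.length + 1) - S.length ≤ m) :
    pvG t S m = pvG t S ((t.length + 1) - S.length) := by
  induction m with
  | zero =>
    have : (t.length + 1) - S.length = 0 := by omega
    rw [this]
  | succ m ih =>
    rcases Nat.lt_or_ge m ((t.length + 1) - S.length) with h | h
    · have : (t.length + 1) - S.length = m + 1 := by omega
      rw [this]
    · have hfalse : S.isPrefixOf (t.drop m) = false := by
        by_contra hc
        have h' : S.isPrefixOf (t.drop m) = true := by simpa using hc
        have := pvSufLtStop t S _ hS h'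
        omega
      rw [pvG_succ, hfalse]
      simp [ih h]

theorem pvRfindEq (t S : List Char) :
    PySem.Chars.rfind t S =
      (match pvG t S ((t.length + 1) - S.length) with | some J => (J : Int) | none => -1) := by
  show PySem.Chars.rfind.go t S t.length = _
  rw [pvRfindGoEq]
  rcases S with _ | ⟨c, S'⟩
  · rfl
  · have hS : (c :: S') ≠ [] := by simp
    rw [pvG_stable t (c :: S') hS (t.length + 1) (by omega)]

-- a foldl over a list each of whose elements fixes the state st is st
theorem pvFoldlFix {α β : Type} (f : β → α → β) (st : β) (l : List α)
    (h : ∀ x ∈ l, f st x = st) : l.foldl f st = st := by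
  induction l with
  | nil => rfl
  | cons x xs ih =>
    simp only [List.foldl_cons, h x (by simp)]
    exact ih (fun y hy => h y (by simp [hy]))

-- the inner loop, characterized by the greatest suffix match below i+p+c
theorem pvInnerEq (t S : List Char) (i a c : Nat) (hia : i ≤ a) (st : Nat × List Char) :
    (List.range' a c).foldl (pvStep t S i) st =
      (match pvG t S (a + c) with
       | some J =>
         if a ≤ J ∧ st.1 < J + S.length - i then
           (J + S.length - i, (t.drop i).take (J + S.length - i))
         else st
       | none => st) := by
  induction c generalizing st with
  | zero =>
    rcases hG : pvG t S (a + 0) with _ | J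
    · rfl
    · have := pvG_some t S _ _ hG
      have : ¬ (a ≤ J ∧ st.1 < J + S.length - i) := by omega
      simp [this]
  | succ c ih =>
    have hexp : List.range' a (c + 1) = List.range' a c ++ [a + c] := by
      rw [List.range'_concat]; simp
    rw [hexp, List.foldl_append, List.foldl_cons, List.foldl_nil, ih st]
    have hG1 : pvG t S (a + (c + 1)) = if S.isPrefixOf (t.drop (a + c)) then some (a + c) else pvG t S (a + c) := by
      show pvG t S ((a + c) + 1) = _
      rfl
    by_cases hm : S.isPrefixOf (t.drop (a + c)) = true
    · rw [hG1]
      simp only [hm, if_true]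
      rcases hG : pvG t S (a + c) with _ | J'
      · simp only [pvStep, PySem.Chars.startswith, hm, if_true]
        have hle : a ≤ a + c := by omega
        by_cases hlt : st.1 < a + c + S.length - i
        · simp [hlt, hle]
        · simp [hlt, hle]
      · obtain ⟨hJ'lt, _, _⟩ := pvG_some t S _ _ hG
        by_cases hcond : a ≤ J' ∧ st.1 < J' + S.length - i
        · simp only [hcond, and_true, if_true, pvStep, PySem.Chars.startswith, hm]
          have h1 : J' + S.length - i < a + c + S.length - i := by omega
          have h2 : st.1 < a + c + S.length - i := by omega
          simp [h1, h2, show a ≤ a + c by omega]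
        · simp only [hcond, if_false, pvStep, PySem.Chars.startswith, hm, if_true]
          have hle : a ≤ a + c := by omega
          by_cases hlt : st.1 < a + c + S.length - i
          · simp [hlt, hle]
          · simp [hlt, hle]
    · simp only [Bool.not_eq_true] at hm
      have hm' : S.isPrefixOf (t.drop (a + c)) = false := hm
      rw [hG1]
      simp only [hm']
      rcases hG : pvG t S (a + c) with _ | J'
      · simp [pvStep, PySem.Chars.startswith, hm']
      · by_cases hcond : a ≤ J' ∧ st.1 < J' + S.length - i
        · simp [hcond, pvStep, PySem.Chars.startswith, hm']
        · simp [hcond, pvStep, PySem.Chars.startswith, hm']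

-- one outer row, characterized by the GLOBAL greatest suffix match G = pvG t S stop
theorem pvRowEq (t P S : List Char) (i : Nat) (st : Nat × List Char) :
    pvRow t P S t.length st i =
      (if PySem.Chars.startswith (t.drop i) P then
        (match pvG t S ((t.length + 1) - S.length) with
         | some J =>
           if i + P.length ≤ J ∧ st.1 < J + S.length - i then
             (J + S.length - i, (t.drop i).take (J + S.length - i))
           else st
         | none => st)
      else st) := by
  unfold pvRow
  by_cases hpref : PySem.Chars.startswith (t.drop i) P = true
  · simp only [hpref, if_true]
    rw [pvInnerEq t S i (i + P.length) _ (by omega) st]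
    rcases Nat.lt_or_ge ((t.length + 1) - S.length) (i + P.length + 1) with hlt | hle
    · have hc : (t.length + 1) - S.length - (i + P.length) = 0 := by omega
      rw [hc]
      rcases hG1 : pvG t S (i + P.length + 0) with _ | J1 <;>
        rcases hG2 : pvG t S ((t.length + 1) - S.length) with _ | J2
      · rfl
      · have := pvG_some t S _ _ hG2
        have : ¬ (i + P.length ≤ J2 ∧ st.1 < J2 + S.length - i) := by omega
        simp [this]
      · have := pvG_some t S _ _ hG1
        have : ¬ (i + P.length ≤ J1 ∧ st.1 < J1 + S.length - i) := by omega
        simp [this]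
      · have := pvG_some t S _ _ hG1
        have h2 := pvG_some t S _ _ hG2
        have e1 : ¬ (i + P.length ≤ J1 ∧ st.1 < J1 + S.length - i) := by omega
        have e2 : ¬ (i + P.length ≤ J2 ∧ st.1 < J2 + S.length - i) := by omega
        simp [e1, e2]
    · have : i + P.length + ((t.length + 1) - S.length - (i + P.length)) = (t.length + 1) - S.length := by omega
      rw [this]
  · simp only [Bool.not_eq_true] at hpref
    simp [hpref]

-- no row can fire: A's accumulator stays (0, [])
theorem pvOuterNone (t P S : List Char)
    (h : ∀ i < t.length, PySem.Chars.startswith (t.drop i) P = true →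
        ∀ J, pvG t S ((t.length + 1) - S.length) = some J → ¬ (i + P.length ≤ J)) :
    (List.range t.length).foldl (pvRow t P S t.length) (0, []) = (0, ([] : List Char)) := by
  apply pvFoldlFix
  intro i hi
  rw [List.mem_range] at hi
  rw [pvRowEq]
  by_cases hpref : PySem.Chars.startswith (t.drop i) P = true
  · simp only [hpref, if_true]
    rcases hG : pvG t S ((t.length + 1) - S.length) with _ | J
    · rfl
    · have := h i hi hpref J hG
      have hng : ¬ (i + P.length ≤ J ∧ 0 < J + S.length - i) := by
        intro hc; exact this hc.1
      simp only [if_neg hng]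
  · simp only [Bool.not_eq_true] at hpref
    simp [hpref]

-- the first firing row i0 sets the final value; later rows never beat it
theorem pvOuterSome (t P S : List Char) (i0 J : Nat)
    (hG : pvG t S ((t.length + 1) - S.length) = some J)
    (hi0 : i0 < t.length)
    (hpref : PySem.Chars.startswith (t.drop i0) P = true)
    (hJ : i0 + P.length ≤ J)
    (hpos : i0 < J + S.length)
    (hmin : ∀ i < i0, PySem.Chars.startswith (t.drop i) P = false) :
    (List.range t.length).foldl (pvRow t P S t.length) (0, []) =
      (J + S.length - i0, (t.drop i0).take (J + S.length - i0)) := by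
  have hsplit : List.range t.length =
      List.range' 0 i0 ++ (i0 :: List.range' (i0 + 1) (t.length - i0 - 1)) := by
    rw [List.range_eq_range']
    have h1 : List.range' 0 i0 ++ List.range' (0 + 1 * i0) (t.length - i0) = List.range' 0 (i0 + (t.length - i0)) := List.range'_append
    have h2 : i0 + (t.length - i0) = t.length := by omega
    have h3 : t.length - i0 = (t.length - i0 - 1) + 1 := by omega
    rw [← h2, ← h1, h3, List.range'_succ]
    simp
  rw [hsplit, List.foldl_append]
  have hfirst : (List.range' 0 i0).foldl (pvRow t P S t.length) (0, []) = (0, ([] : List Char)) := by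
    apply pvFoldlFix
    intro i hi
    rw [List.mem_range'_1] at hi
    rw [pvRowEq]
    simp [hmin i (by omega)]
  rw [hfirst, List.foldl_cons, pvRowEq, hpref, hG]
  simp only [if_true]
  have hcond : i0 + P.length ≤ J ∧ (0, ([] : List Char)).1 < J + S.length - i0 := by
    constructor
    · exact hJ
    · show 0 < J + S.length - i0
      omega
  rw [if_pos hcond]
  apply pvFoldlFix
  intro i hi
  rw [List.mem_range'_1] at hi
  rw [pvRowEq]
  by_cases hp : PySem.Chars.startswith (t.drop i) P = true
  · simp only [hp, if_true, hG]
    have : ¬ (i + P.length ≤ J ∧ (J + S.length - i0, (t.drop i0).take (J + S.length - i0)).1 < J + S.length - i) := by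
      intro hc
      have := hc.2
      simp only at this
      omega
    simp [this]
  · simp only [Bool.not_eq_true] at hp
    simp [hp]

-- prefB i ↔ the prefix (possibly beyond the first occurrence); bridge to find's spec
theorem pvPrefOfFind (t P : List Char) (h : 0 ≤ PySem.Chars.find t P) :
    P.isPrefixOf (t.drop (PySem.Chars.find t P).toNat) = true ∧
      ∀ i < (PySem.Chars.find t P).toNat, P.isPrefixOf (t.drop i) = false := by
  obtain ⟨h1, h2⟩ := PySem.Chars.find_spec h
  refine ⟨List.isPrefixOf_iff_prefix.mpr h1, fun i hi => ?_⟩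
  by_contra hc
  exact h2 i hi (List.isPrefixOf_iff_prefix.mp (by simpa using hc))

-- ===== VERDICT (by name: the statement is the Claim_ definition above) =====
-- every prefix occurrence i (with i < |t| or p ≥ 1) satisfies i + p ≤ |t|
theorem pvPrefLen (t P : List Char) (i : Nat) (h : P.isPrefixOf (t.drop i) = true) :
    P.length ≤ t.length - i := by
  have hp : P <+: t.drop i := List.isPrefixOf_iff_prefix.mp h
  have := hp.length_le
  rw [List.length_drop] at this
  exact this

theorem longest_matching_substring_spec : Claim_equal_longest_matching_substring := by
  intro text regex _
  unfold Spec_longest_matching_substring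
  simp only [longest_matching_substring, longest_matching_substring_alt]
  rcases hpr : pvPartStar regex.toList with ⟨P, S⟩
  simp only
  by_cases hF : PySem.Chars.find text.toList P = -1
  · rw [if_pos hF]
    have hnopref : ∀ i, P.isPrefixOf (text.toList.drop i) = false := by
      intro i
      by_contra hc
      have hc' : P.isPrefixOf (text.toList.drop i) = true := by simpa using hc
      have hinf : P <:+: text.toList := by
        rw [← PySem.Chars.isIn_iff_infix, ← PySem.Chars.exists_prefix_drop_iff_isIn]
        exact ⟨i, List.isPrefixOf_iff_prefix.mp hc'⟩
      rw [PySem.Chars.find_eq_neg_one_iff] at hF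
      exact hF hinf
    rw [pvOuterNone text.toList P S (fun i _ hp => by
      simp only [PySem.Chars.startswith] at hp
      rw [hnopref i] at hp; exact absurd hp (by simp))]
    rfl
  · rw [if_neg hF]
    have hFpos : 0 ≤ PySem.Chars.find text.toList P := by
      have := PySem.Chars.neg_one_le_find text.toList P
      omega
    obtain ⟨hpref0, hmin0⟩ := pvPrefOfFind text.toList P hFpos
    have hFi : PySem.Chars.find text.toList P = ((PySem.Chars.find text.toList P).toNat : Int) :=
      (Int.toNat_of_nonneg hFpos).symm
    set i0 := (PySem.Chars.find text.toList P).toNat with hi0def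
    rw [pvRfindEq]
    rcases hG : pvG text.toList S ((text.toList.length + 1) - S.length) with _ | J
    · -- no suffix occurrence anywhere: rfind = -1, both sides ""
      have hBlt : (-1 : Int) < PySem.Chars.find text.toList P + P.length := by
        rw [hFi]; omega
      rw [if_pos hBlt]
      rw [pvOuterNone text.toList P S (fun i _ _ J hJ => by rw [hG] at hJ; exact absurd hJ (by simp))]
      rfl
    · by_cases hJc : (J : Int) < PySem.Chars.find text.toList P + P.length
      · -- last suffix occurrence is before the end of the first prefix occurrence: both ""
        rw [if_pos hJc]
        rw [hFi] at hJc
        have hkey : ∀ i < text.toList.length, PySem.Chars.startswith (text.toList.drop i) P = true →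
            ∀ J' , pvG text.toList S ((text.toList.length + 1) - S.length) = some J' → ¬ (i + P.length ≤ J') := by
          intro i _ hp J' hJ'
          simp only [PySem.Chars.startswith] at hp
          rw [hG] at hJ'
          injection hJ' with hJ'
          subst hJ'
          have hge : i0 ≤ i := by
            by_contra hlt
            rw [hmin0 i (by omega)] at hp
            exact absurd hp (by simp)
          omega
        rw [pvOuterNone text.toList P S hkey]
        rfl
      · rw [if_neg hJc]
        rw [hFi] at hJc
        have hJge : i0 + P.length ≤ J := by omega
        -- B's slice text[i0 : J+s] as take/drop
        have hslice : PySem.Chars.slice text.toList (some (PySem.Chars.find text.toList P)) (some ((J : Int) + (S.length : Int))) = (text.toList.drop i0).take (J + S.length - i0) := by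
          rw [hFi]
          have h2 : (J : Int) + (S.length : Int) = ((J + S.length : Nat) : Int) := by push_cast; ring
          rw [h2]
          simp only [PySem.Chars.slice_eq_listSlice, PySem.List.slice_natCast]
        by_cases hn : text.toList.length = 0
        · have ht : text.toList = [] := List.length_eq_zero_iff.mp hn
          rw [hslice, ht]
          simp
        · have hi0zero : P.length = 0 → i0 = 0 := by
            intro hp0
            by_contra h0
            have hP : P = [] := List.length_eq_zero_iff.mp hp0
            have h00 := hmin0 0 (by omega)
            rw [hP] at h00
            simp at h00
          have hi0n : i0 < text.toList.length := by
            rcases Nat.eq_zero_or_pos P.length with hp0 | hp1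
            · rw [hi0zero hp0]; omega
            · have := pvPrefLen text.toList P i0 hpref0; omega
          have hpos : i0 < J + S.length := by
            rcases Nat.eq_zero_or_pos P.length with hp0 | hp1
            · rcases Nat.eq_zero_or_pos S.length with hs0 | hs1
              · have hJn : text.toList.length ≤ J := by
                  by_contra hlt
                  obtain ⟨hJlt, _, hmax⟩ := pvG_some _ _ _ _ hG
                  have hS : S = [] := List.length_eq_zero_iff.mp hs0
                  have hsufn : S.isPrefixOf (text.toList.drop text.toList.length) = true := by
                    rw [hS]; simp
                  have hmx := hmax text.toList.length (by omega) (by omega)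
                  rw [hsufn] at hmx
                  exact absurd hmx (by simp)
                rw [hi0zero hp0]; omega
              · omega
            · omega
          have hA := pvOuterSome text.toList P S i0 J hG hi0n
            (by simpa [PySem.Chars.startswith] using hpref0) hJge hpos
            (fun i hi => by simpa [PySem.Chars.startswith] using hmin0 i hi)
          rw [hA, hslice]
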